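-- pv_equiv track=rewrite | github.com/sugan0tech/Projects | programming/python/HackerRank/test.py | spl_fib
-- ===== SOURCE A (Python) =====
-- def prime(num):
--     if num > 1:
--         for i in range(2, num):
--             if num%i == 0:
--                 return 0
--         return 1
--
-- def spl_fib(m:int, n:int, x:int, y:int):
--     tmp = 0
--     for i in range(x - 1):
--         tmp = n
--         n = m + n
--         m = tmp
--         if prime(m) and m**2 > y:
--             return m
--     return -1
-- ===== SOURCE B (Python) =====
-- def spl_fib(m, n, x, y):
--     def is_prime(v):
--         if v < 2:
--             return False
--         i = 2
--         while i * i <= v: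
--             if v % i == 0:
--                 return False
--             i += 1
--         return True
--     for _ in range(x - 1):
--         m, n = n, m + n
--         if is_prime(m) and m * m > y:
--             return m
--     return -1
-- ===== Notes on version B (the rewrite author's own statement) =====
-- stated objective: alternative
-- what changed: B replaces A's None/0/1 trial division over range(2, num) by a boolean is_prime that trial-divides only while i*i <= v, and drops the tmp variable in favour of tuple assignment.
import Mathlib
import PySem

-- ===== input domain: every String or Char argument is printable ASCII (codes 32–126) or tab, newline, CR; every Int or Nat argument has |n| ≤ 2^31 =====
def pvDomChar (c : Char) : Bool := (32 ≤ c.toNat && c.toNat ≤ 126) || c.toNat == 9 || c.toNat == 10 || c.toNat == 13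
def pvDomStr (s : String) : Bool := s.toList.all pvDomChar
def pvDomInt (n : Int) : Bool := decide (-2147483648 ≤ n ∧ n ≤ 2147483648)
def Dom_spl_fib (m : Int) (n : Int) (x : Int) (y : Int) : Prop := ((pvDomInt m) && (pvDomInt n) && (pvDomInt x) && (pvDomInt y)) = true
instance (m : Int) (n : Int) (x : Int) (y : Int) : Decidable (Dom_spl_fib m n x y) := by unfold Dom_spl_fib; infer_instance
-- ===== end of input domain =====

-- B replaces A's None/0/1 trial division over range(2, num) by a boolean sqrt-bounded trial division (while i*i <= v); alternative algorithm, same results.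


-- ===== PORT A =====
-- helper prime(num): returns None for num ≤ 1, else 0/1 via trial division over range(2, num)
def primeLoopA (num : Int) : List Int → Int
  | [] => 1
  | i :: rest => if PySem.Int.mod num i = 0 then 0 else primeLoopA num rest

def primeA (num : Int) : Option Int :=
  if num > 1 then some (primeLoopA num (PySem.List.pyRange 2 num 1)) else none

-- Python truthiness of prime's result (None and 0 are falsy)
def primeATruthy (num : Int) : Bool :=
  match primeA num with
  | none => false
  | some v => v ≠ 0

def splFibLoopA (y : Int) : Nat → Int → Int → Int
  | 0, _, _ => -1
  | k + 1, m, n =>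
      let tmp := n
      let n' := m + n
      let m' := tmp
      if primeATruthy m' ∧ m' ^ 2 > y then m' else splFibLoopA y k m' n'

def spl_fib (m : Int) (n : Int) (x : Int) (y : Int) : Int :=
  splFibLoopA y (x - 1).toNat m n

-- ===== PORT B =====
-- the while loop of is_prime: while i * i <= v try divisor i (fuel only makes the loop total; it never runs out on the fuel isPrimeB supplies)
def trialB (v : Int) : Nat → Int → Bool
  | 0, _ => true
  | f + 1, i =>
      if i * i ≤ v then
        (if PySem.Int.mod v i = 0 then false else trialB v f (i + 1))
      else true

def isPrimeB (v : Int) : Bool :=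
  if v < 2 then false else trialB v (v.toNat + 1) 2

def splFibLoopB (y : Int) : Nat → Int → Int → Int
  | 0, _, _ => -1
  | k + 1, m, n =>
      let m' := n
      let n' := m + n
      if isPrimeB m' ∧ m' * m' > y then m' else splFibLoopB y k m' n'

def spl_fib_alt (m : Int) (n : Int) (x : Int) (y : Int) : Int :=
  splFibLoopB y (x - 1).toNat m n

-- ===== PRECONDITION & SPEC =====
def Spec_spl_fib (m : Int) (n : Int) (x : Int) (y : Int) (out : Int) : Prop := out = spl_fib_alt m n x y
instance (m : Int) (n : Int) (x : Int) (y : Int) (out : Int) : Decidable (Spec_spl_fib m n x y out) := by unfold Spec_spl_fib; infer_instance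

-- ===== CLAIM (what is proved, stated in full; the proofs are below) =====
def Claim_equal_spl_fib : Prop := ∀ (m : Int) (n : Int) (x : Int) (y : Int), Dom_spl_fib m n x y → Spec_spl_fib m n x y (spl_fib m n x y)

-- ===== LEMMAS AND PROOFS =====
theorem primeLoopA_eq_one (num : Int) (l : List Int) :
    primeLoopA num l = 1 ↔ ∀ i ∈ l, ¬ i ∣ num := by
  induction l with
  | nil => simp [primeLoopA]
  | cons i rest ih =>
      simp only [primeLoopA, List.mem_cons]
      by_cases h : PySem.Int.mod num i = 0
      · rw [PySem.Int.mod_eq_zero_iff_dvd] at h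
        simp only [if_pos (PySem.Int.mod_eq_zero_iff_dvd num i |>.2 h)]
        constructor
        · intro h01; omega
        · intro hall; exact absurd h (hall i (Or.inl rfl))
      · simp only [if_neg h, ih]
        rw [PySem.Int.mod_eq_zero_iff_dvd] at h
        constructor
        · intro hall j hj
          rcases hj with rfl | hj
          · exact h
          · exact hall j hj
        · intro hall j hj; exact hall j (Or.inr hj)

theorem primeATruthy_iff (v : Int) :
    primeATruthy v = true ↔ 1 < v ∧ ∀ i : Int, 2 ≤ i → i < v → ¬ i ∣ v := by
  unfold primeATruthy primeA
  by_cases h : v > 1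
  · rw [if_pos h]
    have h01 : primeLoopA v (PySem.List.pyRange 2 v 1) = 0 ∨
        primeLoopA v (PySem.List.pyRange 2 v 1) = 1 := by
      generalize PySem.List.pyRange 2 v 1 = l
      induction l with
      | nil => simp [primeLoopA]
      | cons i rest ih => by_cases hm : PySem.Int.mod v i = 0 <;> simp [primeLoopA, hm, ih]
    have hone : primeLoopA v (PySem.List.pyRange 2 v 1) = 1 ↔
        ∀ i : Int, 2 ≤ i → i < v → ¬ i ∣ v := by
      rw [primeLoopA_eq_one]
      constructor
      · intro hall i h2 hlt
        exact hall i (by rw [PySem.List.mem_pyRange_one]; omega)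
      · intro hall i hi
        rw [PySem.List.mem_pyRange_one] at hi
        exact hall i hi.1 hi.2
    constructor
    · intro hp
      have hp' : primeLoopA v (PySem.List.pyRange 2 v 1) ≠ 0 := by simpa using hp
      have h1 : primeLoopA v (PySem.List.pyRange 2 v 1) = 1 := by
        rcases h01 with h0 | h1
        · exact absurd h0 hp'
        · exact h1
      exact ⟨h, hone.1 h1⟩
    · rintro ⟨-, hall⟩
      simp [hone.2 hall]
  · rw [if_neg h]; simp; omega

theorem trialB_spec (v : Int) : ∀ (fuel : Nat) (i : Int), 2 ≤ i → v < i + fuel →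
    (trialB v fuel i = true ↔ ∀ j : Int, i ≤ j → j * j ≤ v → ¬ j ∣ v) := by
  intro fuel
  induction fuel with
  | zero =>
      intro i h2 hv
      simp only [trialB, true_iff]
      intro j hij hjj
      exfalso
      have hj0 : (0:Int) ≤ j := by omega
      have ha : j * i ≤ j * j := mul_le_mul_of_nonneg_left hij hj0
      have hb : j * 2 ≤ j * i := mul_le_mul_of_nonneg_left h2 hj0
      push_cast at hv
      linarith
  | succ f ih =>
      intro i h2 hv
      simp only [trialB]
      by_cases hle : i * i ≤ v
      · rw [if_pos hle]
        by_cases hm : PySem.Int.mod v i = 0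
        · rw [if_pos hm]
          rw [PySem.Int.mod_eq_zero_iff_dvd] at hm
          simp only [Bool.false_eq_true, false_iff, not_forall]
          exact ⟨i, le_refl i, hle, by simpa using hm⟩
        · rw [if_neg hm]
          rw [PySem.Int.mod_eq_zero_iff_dvd] at hm
          rw [ih (i + 1) (by omega) (by push_cast; omega)]
          constructor
          · intro hall j hij hjj
            rcases eq_or_lt_of_le hij with rfl | hlt
            · exact hm
            · exact hall j (by omega) hjj
          · intro hall j hij hjj
            exact hall j (by omega) hjj
      · rw [if_neg hle]
        simp only [true_iff]
        intro j hij hjj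
        exfalso
        have : i * i ≤ j * j := by nlinarith
        omega

theorem isPrimeB_iff (v : Int) :
    isPrimeB v = true ↔ 2 ≤ v ∧ ∀ j : Int, 2 ≤ j → j * j ≤ v → ¬ j ∣ v := by
  unfold isPrimeB
  by_cases h : v < 2
  · rw [if_pos h]; simp; omega
  · rw [if_neg h]
    have hv : 2 ≤ v := by omega
    rw [trialB_spec v (v.toNat + 1) 2 (by omega) (by omega)]
    exact ⟨fun hall => ⟨hv, hall⟩, fun h => h.2⟩

-- the two primality conditions agree, via Nat.Prime of v.toNat
theorem prime_conds_eq (v : Int) : primeATruthy v = isPrimeB v := by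
  by_cases hv : v < 2
  · have ha : primeATruthy v = false := by
      unfold primeATruthy primeA
      rw [if_neg (by omega)]
    have hb : isPrimeB v = false := by unfold isPrimeB; rw [if_pos hv]
    rw [ha, hb]
  · have hv2 : 2 ≤ v := by omega
    have hcast : ((v.toNat : Int)) = v := Int.toNat_of_nonneg (by omega)
    have hdvd : ∀ j : Int, 2 ≤ j → (j ∣ v ↔ j.toNat ∣ v.toNat) := by
      intro j hj
      rw [← Int.natCast_dvd_natCast, Int.toNat_of_nonneg (show (0:Int) ≤ j by omega), hcast]
    have hA : primeATruthy v = true ↔ Nat.Prime v.toNat := by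
      rw [primeATruthy_iff, Nat.prime_def_lt']
      constructor
      · rintro ⟨h1, hall⟩
        refine ⟨by omega, fun m h2 hlt hd => ?_⟩
        exact hall (m : Int) (by exact_mod_cast h2) (by omega)
          ((hdvd m (by exact_mod_cast h2)).2 (by simpa using hd))
      · rintro ⟨h2, hall⟩
        refine ⟨by omega, fun i hi hlt hd => ?_⟩
        exact hall i.toNat (by omega) (by omega) ((hdvd i hi).1 hd)
    have hB : isPrimeB v = true ↔ Nat.Prime v.toNat := by
      rw [isPrimeB_iff, Nat.prime_def_le_sqrt]
      constructor
      · rintro ⟨h1, hall⟩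
        refine ⟨by omega, fun m h2 hle hd => ?_⟩
        have hmm : (m : Int) * m ≤ v := by
          have hmsq : m * m ≤ v.toNat := by
            have h := Nat.le_sqrt'.1 hle
            rwa [pow_two] at h
          have h2 : ((m * m : Nat) : Int) ≤ (v.toNat : Int) := by exact_mod_cast hmsq
          push_cast at h2
          rwa [hcast] at h2
        exact hall (m : Int) (by exact_mod_cast h2) hmm
          ((hdvd m (by exact_mod_cast h2)).2 (by simpa using hd))
      · rintro ⟨h2, hall⟩
        refine ⟨by omega, fun j hj hjj hd => ?_⟩
        have hcj : ((j.toNat : Int)) = j := Int.toNat_of_nonneg (by omega)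
        have hnat : j.toNat * j.toNat ≤ v.toNat := by
          have h2 : ((j.toNat : Int)) * j.toNat ≤ (v.toNat : Int) := by
            rw [hcj, hcast]; exact hjj
          exact_mod_cast h2
        have hle : j.toNat ≤ Nat.sqrt v.toNat := Nat.le_sqrt'.2 (by rw [pow_two]; exact hnat)
        exact hall j.toNat (by omega) hle ((hdvd j hj).1 hd)
    rcases Bool.eq_false_or_eq_true (isPrimeB v) with hb | hb
    · rw [hb]
      exact hA.2 (hB.1 hb)
    · rw [hb]
      rcases Bool.eq_false_or_eq_true (primeATruthy v) with ha | ha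
      · exact absurd (hB.2 (hA.1 ha)) (by simp [hb])
      · exact ha

theorem loop_eq (y : Int) (k : Nat) : ∀ (m n : Int),
    splFibLoopA y k m n = splFibLoopB y k m n := by
  induction k with
  | zero => intro m n; rfl
  | succ k ih =>
      intro m n
      simp only [splFibLoopA, splFibLoopB]
      rw [show (n : Int) ^ 2 = n * n from pow_two n, prime_conds_eq n]
      split_ifs with h
      · rfl
      · exact ih n (m + n)

-- ===== VERDICT (by name: the statement is the Claim_ definition above) =====
theorem spl_fib_spec : Claim_equal_spl_fib := by
  intro m n x y _
  unfold Spec_spl_fib spl_fib spl_fib_alt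
  exact loop_eq y _ m n
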